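-- pv_equiv track=rewrite | github.com/stalj/pp1 | test 2 julii/p3.py | f
-- ===== SOURCE A (Python) =====
-- def f(array):
--     result=[]
--     suma=0
--     for i in range (len(array[0])):
--         for j in range (len(array)):
--             suma+=array[j][i]
--         result.append(suma)
--         suma=0
--
--     najwieksza=result[0]
--     for r in result:
--         if r> najwieksza:
--             najwieksza=r
--
--     z=result.index(najwieksza)
--     return z
-- ===== SOURCE B (Python) =====
-- def f(array):
--     sums = [0] * len(array[0])
--     for row in array:
--         sums = [s + v for s, v in zip(sums, row)]
--     best_i = 0
--     best = sums[0]
--     for i, v in enumerate(sums):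
--         if v > best:
--             best_i, best = i, v
--     return best_i
-- ===== Notes on version B (the rewrite author's own statement) =====
-- stated objective: alternative
-- what changed: Row-major accumulation of all column sums in one zipped list instead of a column-major double loop rebuilding one scalar per column, and a single-pass argmax scan instead of a separate max pass followed by list.index.
import Mathlib
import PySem

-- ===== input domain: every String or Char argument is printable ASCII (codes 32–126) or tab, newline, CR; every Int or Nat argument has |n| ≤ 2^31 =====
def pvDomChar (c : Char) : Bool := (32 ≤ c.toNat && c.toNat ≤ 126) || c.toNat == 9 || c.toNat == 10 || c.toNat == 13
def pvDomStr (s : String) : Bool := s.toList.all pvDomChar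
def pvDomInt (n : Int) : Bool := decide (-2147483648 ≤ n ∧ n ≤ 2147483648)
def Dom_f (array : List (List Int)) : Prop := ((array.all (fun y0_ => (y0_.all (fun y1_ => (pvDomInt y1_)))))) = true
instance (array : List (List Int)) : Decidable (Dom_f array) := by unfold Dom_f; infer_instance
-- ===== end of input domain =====

-- B accumulates all column sums row-major in one list and picks the argmax in a single scan,
-- instead of A's column-major double loop followed by a separate max pass and list.index.


-- ===== PORT A =====
def f (array : List (List Int)) : Int :=
  let row0 := PySem.List.pyGetD array 0 []          -- array[0]  (raises outside Pre_)
  let result := (PySem.List.pyRange 0 (row0.length : Int)).foldl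
    (fun result i =>
      let suma := (PySem.List.pyRange 0 (array.length : Int)).foldl
        (fun suma j => suma + PySem.List.pyGetD (PySem.List.pyGetD array j []) i 0) 0
      result ++ [suma]) []
  let naj0 := PySem.List.pyGetD result 0 0          -- result[0] (raises outside Pre_)
  let naj := result.foldl (fun naj r => if r > naj then r else naj) naj0
  (((PySem.List.index? result naj).getD 0 : Nat) : Int)

-- ===== PORT B =====
def f_alt (array : List (List Int)) : Int :=
  let sums := array.foldl
    (fun sums row => (sums.zip row).map (fun p => p.1 + p.2))
    (List.replicate (PySem.List.pyGetD array 0 []).length (0 : Int))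
  let best0 := PySem.List.pyGetD sums 0 0           -- sums[0] (raises outside Pre_)
  let res := (PySem.List.enumerate sums).foldl
    (fun s iv => if iv.2 > s.2 then (iv.1, iv.2) else s) ((0 : Int), best0)
  res.1

-- ===== PRECONDITION & SPEC =====
-- Pre_f is exactly where the Python A returns: a nonempty array with a nonempty first row
-- whose every row reaches the first row's length (otherwise array[0], result[0] or array[j][i]
-- raises IndexError).
def Pre_f (array : List (List Int)) : Prop :=
  array ≠ [] ∧ array.headI ≠ [] ∧ ∀ row ∈ array, array.headI.length ≤ row.length
instance (array : List (List Int)) : Decidable (Pre_f array) := by unfold Pre_f; infer_instance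

def pvWitness_f : List (List Int) := [[1, 2], [3, -1]]

def Spec_f (array : List (List Int)) (out : Int) : Prop := out = f_alt array
instance (array : List (List Int)) (out : Int) : Decidable (Spec_f array out) := by unfold Spec_f; infer_instance

-- ===== CLAIM (what is proved, stated in full; the proofs are below) =====
def Claim_equal_f : Prop := ∀ (array : List (List Int)), Dom_f array → Pre_f array → Spec_f array (f array)

-- ===== LEMMAS AND PROOFS =====

-- A's max-update step is Int.max.
theorem pv_step_max : (fun (naj r : Int) => if r > naj then r else naj) = (fun naj r => max naj r) := by
  funext naj r; simp only [gt_iff_lt, max_def]; split_ifs <;> omega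

-- one zip step over a range-map accumulator
theorem pv_zip_step (n : Nat) (g : Nat → Int) (row : List Int) (h : n ≤ row.length) :
    ((((List.range n).map g).zip row).map (fun p => p.1 + p.2))
      = (List.range n).map (fun k => g k + row.getD k 0) := by
  apply List.ext_getElem
  · simp [Nat.min_eq_left h]
  · intro k h1 h2
    simp only [List.length_map, List.length_zip, List.length_range] at h1
    have hk : k < n := lt_of_lt_of_le h1 (min_le_left _ _)
    have hkr : k < row.length := lt_of_lt_of_le h1 (min_le_right _ _)
    simp [List.getElem_zip, List.getD, List.getElem?_eq_getElem hkr]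

-- B's row fold computes all column partial sums at once.
theorem pv_sums_inv (rows : List (List Int)) (n : Nat) (g : Nat → Int)
    (h : ∀ row ∈ rows, n ≤ row.length) :
    rows.foldl (fun sums row => (sums.zip row).map (fun p => p.1 + p.2)) ((List.range n).map g)
      = (List.range n).map (fun k => g k + (rows.map (fun row => row.getD k 0)).sum) := by
  induction rows generalizing g with
  | nil => simp
  | cons row rows ih =>
    simp only [List.foldl_cons]
    rw [pv_zip_step n g row (h row (by simp))]
    rw [ih (fun k => g k + row.getD k 0) (fun r hr => h r (by simp [hr]))]
    simp [add_assoc]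

-- B's single scan over the enumerated list is "index of the first maximum".
theorem pv_scan (t : List Int) (bv bi k : Int) :
    (PySem.List.enumerate t k).foldl (fun s iv => if iv.2 > s.2 then (iv.1, iv.2) else s) (bi, bv)
      = (if t.foldl max bv > bv then k + (((PySem.List.index? t (t.foldl max bv)).getD 0 : Nat) : Int) else bi,
         t.foldl max bv) := by
  induction t generalizing bv bi k with
  | nil => simp
  | cons v t ih =>
    rw [PySem.List.enumerate_cons]
    simp only [List.foldl_cons]
    by_cases hv : v > bv
    · simp only [if_pos hv]
      rw [ih v k (k + 1)]
      have hMv : v ≤ t.foldl max v := (PySem.List.le_foldl_max t v).1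
      rw [show max bv v = v from max_eq_right (le_of_lt hv)]
      by_cases hM : t.foldl max v > v
      · have hne : v ≠ t.foldl max v := by omega
        have hmem : t.foldl max v ∈ t := by
          rcases PySem.List.foldl_max_mem t v with h | h
          · omega
          · exact h
        have hsome : (PySem.List.index? t (t.foldl max v)).isSome = true :=
          (PySem.List.index?_isSome_iff t (t.foldl max v)).mpr hmem
        obtain ⟨j, hj⟩ := Option.isSome_iff_exists.mp hsome
        rw [PySem.List.index?_cons_of_ne (x := v) (v := t.foldl max v) t hne, hj]
        simp only [Option.map_some, Option.getD_some]
        rw [if_pos hM, if_pos (by omega : t.foldl max v > bv)]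
        simp only [Prod.mk.injEq, and_true]
        push_cast; ring
      · have hMeq : t.foldl max v = v := le_antisymm (by omega) hMv
        rw [hMeq, if_neg (by omega), if_pos hv, PySem.List.index?_cons_self]
        simp
    · simp only [if_neg hv]
      rw [ih bv bi (k + 1)]
      have hMbv0 : bv ≤ t.foldl max bv := (PySem.List.le_foldl_max t bv).1
      rw [show max bv v = bv from max_eq_left (by omega)]
      by_cases hM : t.foldl max bv > bv
      · have hne : v ≠ t.foldl max bv := by omega
        have hmem : t.foldl max bv ∈ t := by
          rcases PySem.List.foldl_max_mem t bv with h | h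
          · omega
          · exact h
        have hsome : (PySem.List.index? t (t.foldl max bv)).isSome = true :=
          (PySem.List.index?_isSome_iff t (t.foldl max bv)).mpr hmem
        obtain ⟨j, hj⟩ := Option.isSome_iff_exists.mp hsome
        rw [PySem.List.index?_cons_of_ne (x := v) (v := t.foldl max bv) t hne, hj]
        simp only [Option.map_some, Option.getD_some]
        rw [if_pos hM, if_pos hM]
        simp only [Prod.mk.injEq, and_true]
        push_cast; ring
      · rw [if_neg hM, if_neg hM]

-- the common column-sum list both programs compute
theorem pv_result_eq (array : List (List Int)) (hne : array ≠ [])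
    (hlen : ∀ row ∈ array, array.headI.length ≤ row.length) :
    (PySem.List.pyRange 0 ((PySem.List.pyGetD array 0 []).length : Int)).foldl
      (fun result i =>
        result ++ [(PySem.List.pyRange 0 (array.length : Int)).foldl
          (fun suma j => suma + PySem.List.pyGetD (PySem.List.pyGetD array j []) i 0) 0])
      []
    = (List.range array.headI.length).map
        (fun k => (array.map (fun row => row.getD k 0)).sum) := by
  have h0 : PySem.List.pyGetD array 0 [] = array.headI := by
    cases array with
    | nil => simp at hne
    | cons a t => simp [PySem.List.pyGetD_zero]
  rw [h0, PySem.List.foldl_append_singleton_eq_map, List.nil_append,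
      PySem.List.pyRange_zero_nat array.headI.length, List.map_map]
  apply List.map_congr_left
  intro k hk
  simp only [Function.comp_apply]
  rw [PySem.List.foldl_pyRange_zero_pyGetD' array [] (fun acc row => acc + PySem.List.pyGetD row (k : Int) 0) 0,
      PySem.List.foldl_add, zero_add]
  congr 1
  apply List.map_congr_left
  intro row _
  rw [PySem.List.pyGetD_natCast]

theorem pv_main (array : List (List Int)) (hp : Pre_f array) : f array = f_alt array := by
  obtain ⟨hne, h0ne, hlen⟩ := hp
  unfold f f_alt
  simp only []
  rw [pv_result_eq array hne hlen]
  -- B's sums is the same list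
  have h0 : PySem.List.pyGetD array 0 [] = array.headI := by
    cases array with
    | nil => simp at hne
    | cons a t => simp [PySem.List.pyGetD_zero]
  rw [h0]
  have hrep : List.replicate array.headI.length (0 : Int)
      = (List.range array.headI.length).map (fun _ => (0 : Int)) := by
    rw [List.map_const', List.length_range]
  rw [hrep, pv_sums_inv array array.headI.length (fun _ => 0) hlen]
  simp only [zero_add]
  -- now both sides select from the same nonempty list r
  set S : Nat → Int := fun k => (array.map (fun row => row.getD k 0)).sum with hS
  have hn : 0 < array.headI.length := by
    cases h : array.headI with
    | nil => exact absurd h h0ne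
    | cons a t => simp
  have hne2 : (List.range array.headI.length).map S ≠ [] := by
    simp only [ne_eq, List.map_eq_nil_iff, List.range_eq_nil]
    omega
  obtain ⟨x, t, hr⟩ := List.exists_cons_of_ne_nil hne2
  rw [hr]
  -- A side
  rw [show PySem.List.pyGetD (x :: t) 0 0 = x by simp [PySem.List.pyGetD_zero]]
  rw [pv_step_max]
  rw [show List.foldl (fun naj r => max naj r) x (x :: t) = t.foldl max x by simp]
  -- B side
  rw [show PySem.List.enumerate (x :: t) = (0, x) :: PySem.List.enumerate t 1 from
    PySem.List.enumerate_cons x t 0]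
  simp only [List.foldl_cons, gt_iff_lt, lt_self_iff_false, ite_false]
  rw [pv_scan t x 0 1]
  have hMx : x ≤ t.foldl max x := (PySem.List.le_foldl_max t x).1
  by_cases hM : t.foldl max x > x
  · have hne3 : x ≠ t.foldl max x := by omega
    have hmem : t.foldl max x ∈ t := by
      rcases PySem.List.foldl_max_mem t x with h | h
      · omega
      · exact h
    have hsome : (PySem.List.index? t (t.foldl max x)).isSome = true :=
      (PySem.List.index?_isSome_iff t (t.foldl max x)).mpr hmem
    obtain ⟨j, hj⟩ := Option.isSome_iff_exists.mp hsome
    rw [PySem.List.index?_cons_of_ne (x := x) (v := t.foldl max x) t hne3, hj]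
    simp only [Option.map_some, Option.getD_some, if_pos hM]
    push_cast; ring
  · have hMeq : t.foldl max x = x := le_antisymm (by omega) hMx
    rw [hMeq, PySem.List.index?_cons_self]
    simp

-- ===== VERDICT (by name: the statement is the Claim_ definition above) =====
theorem f_spec : Claim_equal_f := by
  intro array _ hp
  unfold Spec_f
  exact pv_main array hp
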